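-- pv_equiv track=rewrite | github.com/Conner-Beard/advent_of_code_2025 | day3/main.py | find_largest_two
-- ===== SOURCE A (Python) =====
-- def find_largest_two(bank):
--     """
--     find the two numbers in a list of ints that
--     produce the largest total value when combined
--     sequentialy
--     :input bank: list of ints
--     :output total: largest combo of two ints in sequence
--     """
--     largest = 0
--     for base_index, battery in enumerate(bank):
--         base = battery * 10
--         for battery in bank[base_index+1:]:
--             total = base + battery
--             if total > largest:
--                 largest = total
--     return largest
-- ===== SOURCE B (Python) =====
-- def find_largest_two(bank):
--     """O(n) rewrite: scan from the right keeping the running maximum of the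
--     elements already seen (the suffix max); for each element x the best pair
--     starting at x is x*10 + suffix_max."""
--     best = 0
--     max_after = None
--     for x in reversed(bank):
--         if max_after is not None:
--             total = x * 10 + max_after
--             if total > best:
--                 best = total
--             if x > max_after:
--                 max_after = x
--         else:
--             max_after = x
--     return best
-- ===== Notes on version B (the rewrite author's own statement) =====
-- stated objective: faster
-- what changed: Replaced the nested pair scan (each element combined with every later element) by a single right-to-left pass that maintains the running suffix maximum, pairing each element with the best later element.
import Mathlib
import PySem

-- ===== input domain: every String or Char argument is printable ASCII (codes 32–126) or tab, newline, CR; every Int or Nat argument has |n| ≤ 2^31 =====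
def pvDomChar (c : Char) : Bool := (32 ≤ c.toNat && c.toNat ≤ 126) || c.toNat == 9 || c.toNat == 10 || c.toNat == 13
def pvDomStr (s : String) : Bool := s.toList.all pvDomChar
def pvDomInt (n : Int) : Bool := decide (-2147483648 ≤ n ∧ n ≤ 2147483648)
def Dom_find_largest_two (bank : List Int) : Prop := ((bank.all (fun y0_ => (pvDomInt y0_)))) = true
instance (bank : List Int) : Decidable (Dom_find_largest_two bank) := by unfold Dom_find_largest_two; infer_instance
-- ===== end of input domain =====

-- B replaces A's O(n^2) nested pair scan by one right-to-left pass with a running suffix maximum.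

-- ===== PORT A =====
def find_largest_two (bank : List Int) : Int :=
  (PySem.List.enumerate bank 0).foldl
    (fun largest p =>
      (PySem.List.slice bank (some (p.1 + 1)) none).foldl
        (fun largest battery =>
          let total := p.2 * 10 + battery
          if total > largest then total else largest) largest)
    0

-- ===== PORT B =====
def find_largest_two_alt (bank : List Int) : Int :=
  (bank.reverse.foldl
    (fun st x =>
      (match st.2 with
       | some mm => if x * 10 + mm > st.1 then x * 10 + mm else st.1
       | none => st.1,
       match st.2 with
       | some mm => if x > mm then some x else some mm
       | none => some x))
    ((0 : Int), (none : Option Int))).1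

-- ===== PRECONDITION & SPEC =====
def Spec_find_largest_two (bank : List Int) (out : Int) : Prop := out = find_largest_two_alt bank
instance (bank : List Int) (out : Int) : Decidable (Spec_find_largest_two bank out) := by unfold Spec_find_largest_two; infer_instance

-- ===== CLAIM (what is proved, stated in full; the proofs are below) =====
def Claim_equal_find_largest_two : Prop := ∀ (bank : List Int), Dom_find_largest_two bank → Spec_find_largest_two bank (find_largest_two bank)

-- ===== LEMMAS AND PROOFS =====

/-- max of a list (none on empty). -/
def pvMaxL : List Int → Option Int
  | [] => none
  | x :: xs => some (match pvMaxL xs with | none => x | some m => max x m)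

/-- max over all pairs i < j of xs[i]*10 + xs[j] (none if fewer than 2 elements). -/
def pvMaxC : List Int → Option Int
  | [] => none
  | x :: xs =>
    match pvMaxL xs, pvMaxC xs with
    | none, _ => none
    | some m, none => some (x * 10 + m)
    | some m, some c => some (max (x * 10 + m) c)

def pvInner (l x : Int) (xs : List Int) : Int :=
  xs.foldl (fun largest battery =>
    let total := x * 10 + battery
    if total > largest then total else largest) l

def pvGoA (l : Int) : List Int → Int
  | [] => l
  | x :: xs => pvGoA (pvInner l x xs) xs

lemma pvIteGtMax (a b : Int) : (if a > b then a else b) = max b a := by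
  rw [max_def]; split_ifs <;> omega

lemma pvMaxL_nil_iff (xs : List Int) : pvMaxL xs = none ↔ xs = [] := by
  cases xs <;> simp [pvMaxL]

lemma pvInner_eq (x : Int) (xs : List Int) : ∀ l, pvInner l x xs =
    match pvMaxL xs with | none => l | some m => max l (x * 10 + m) := by
  induction xs with
  | nil => intro l; simp [pvInner, pvMaxL]
  | cons y ys ih =>
    intro l
    have hstep : (if x * 10 + y > l then x * 10 + y else l) = max l (x * 10 + y) := by
      rw [max_def]; split_ifs <;> omega
    have h := ih (max l (x * 10 + y))
    simp only [pvInner, List.foldl_cons] at h ⊢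
    rw [hstep, h]
    cases hm : pvMaxL ys with
    | none => simp [pvMaxL, hm]
    | some m => simp only [pvMaxL, hm]; rw [max_assoc, max_add_add_left]

lemma pvGoA_eq : ∀ (xs : List Int) (l : Int), pvGoA l xs =
    match pvMaxC xs with | none => l | some c => max l c := by
  intro xs
  induction xs with
  | nil => intro l; simp [pvGoA, pvMaxC]
  | cons x ys ih =>
    intro l
    simp only [pvGoA]
    rw [ih, pvInner_eq]
    cases hm : pvMaxL ys with
    | none =>
      have : ys = [] := (pvMaxL_nil_iff ys).1 hm
      subst this
      simp [pvMaxC, pvMaxL]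
    | some m =>
      cases hc : pvMaxC ys with
      | none => simp only [pvMaxC, hm, hc]
      | some c => simp only [pvMaxC, hm, hc]; rw [max_assoc]

lemma pvOuter (bank : List Int) : ∀ (tail : List Int) (s : Nat) (l : Int),
    bank.drop s = tail →
    (PySem.List.enumerate tail (s : Int)).foldl
      (fun largest p =>
        (PySem.List.slice bank (some (p.1 + 1)) none).foldl
          (fun largest battery =>
            let total := p.2 * 10 + battery
            if total > largest then total else largest) largest)
      l = pvGoA l tail := by
  intro tail
  induction tail with
  | nil => intro s l _; simp [PySem.List.enumerate_nil, pvGoA]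
  | cons x xs ih =>
    intro s l h
    have hd : bank.drop (s + 1) = xs := by
      rw [← List.tail_drop, h]; rfl
    have hcast : (s : Int) + 1 = ((s + 1 : Nat) : Int) := by push_cast; ring
    rw [PySem.List.enumerate_cons, List.foldl_cons]
    simp only [hcast, PySem.List.slice_from_natCast, hd]
    rw [ih (s + 1) _ hd]
    simp [pvGoA, pvInner]

lemma pvA_eq (bank : List Int) : find_largest_two bank = pvGoA 0 bank := by
  have h := pvOuter bank bank 0 0 (by simp)
  simpa [find_largest_two] using h

lemma pvB_eq : ∀ (xs : List Int),
    List.foldr (fun x st =>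
      ((match st.2 with
        | some mm => if x * 10 + mm > st.1 then x * 10 + mm else st.1
        | none => st.1),
       (match st.2 with
        | some mm => if x > mm then some x else some mm
        | none => some x))) ((0 : Int), (none : Option Int)) xs =
    ((match pvMaxC xs with | none => 0 | some c => max 0 c), pvMaxL xs) := by
  intro xs
  induction xs with
  | nil => simp [pvMaxC, pvMaxL]
  | cons x ys ih =>
    rw [List.foldr_cons, ih]
    cases hm : pvMaxL ys with
    | none =>
      have : ys = [] := (pvMaxL_nil_iff ys).1 hm
      subst this
      simp [pvMaxC, pvMaxL]
    | some m =>
      have hsnd : (if x > m then some x else some m) = some (max x m) := by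
        rw [max_def]; split_ifs <;> simp <;> omega
      cases hc : pvMaxC ys with
      | none =>
        simp only [pvMaxC, pvMaxL, hm, hc, Prod.mk.injEq]
        refine ⟨?_, hsnd⟩
        exact pvIteGtMax _ _
      | some c =>
        simp only [pvMaxC, pvMaxL, hm, hc, Prod.mk.injEq]
        refine ⟨?_, hsnd⟩
        rw [pvIteGtMax, max_assoc, max_comm c]

-- ===== VERDICT (by name: the statement is the Claim_ definition above) =====
theorem find_largest_two_spec : Claim_equal_find_largest_two := by
  intro bank _
  unfold Spec_find_largest_two find_largest_two_alt
  rw [List.foldl_reverse]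
  have hb := pvB_eq bank
  rw [pvA_eq bank, pvGoA_eq]
  simp only [hb]
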